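-- pv_equiv track=rewrite | github.com/Mingg2211/Elasticsearch_main | elastic_search_tool.py | query_process
-- ===== SOURCE A (Python) =====
-- def query_process(query:str):
--     """
--     Xây dựng luật để tạo truy vấn
--     AND : +
--     OR : |
--     EXACT_MATCH = ""
--     GROUP = ()
--     NOT = -
--     VD : "Nga" + "Việt Nam" - "Trung Quốc"
--     """
--     rules = {
--         "AND": "+",
--         "OR": "|",
--         "NOT": "-",
--     }
--     terms = query.split(' ')
--     i = 0
--     while i < len(terms):
--         if terms[i] in rules.values():
--             terms[i] = list(rules.keys())[list(rules.values()).index(terms[i])]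
--         i += 1
--     query_string = " ".join(terms)
--
--     return query_string
-- ===== SOURCE B (Python) =====
-- def query_process(query: str):
--     # Single left-to-right character scan: replace '+', '|', '-' with AND/OR/NOT
--     # only when the symbol is a whole space-delimited token; no tokenize/join pass.
--     names = {'+': 'AND', '|': 'OR', '-': 'NOT'}
--     out = []
--     prev_boundary = True
--     n = len(query)
--     for i, c in enumerate(query):
--         if c in names and prev_boundary and (i + 1 == n or query[i + 1] == ' '):
--             out.append(names[c])
--         else:
--             out.append(c)
--         prev_boundary = (c == ' ')
--     return ''.join(out)
-- ===== Notes on version B (the rewrite author's own statement) =====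
-- stated objective: alternative
-- what changed: Replaces the split-on-space / index-while-loop / dict-keys-values-index dance / join pipeline with a single left-to-right character scan that rewrites an operator symbol only when it stands as a whole space-delimited token.
import Mathlib
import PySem

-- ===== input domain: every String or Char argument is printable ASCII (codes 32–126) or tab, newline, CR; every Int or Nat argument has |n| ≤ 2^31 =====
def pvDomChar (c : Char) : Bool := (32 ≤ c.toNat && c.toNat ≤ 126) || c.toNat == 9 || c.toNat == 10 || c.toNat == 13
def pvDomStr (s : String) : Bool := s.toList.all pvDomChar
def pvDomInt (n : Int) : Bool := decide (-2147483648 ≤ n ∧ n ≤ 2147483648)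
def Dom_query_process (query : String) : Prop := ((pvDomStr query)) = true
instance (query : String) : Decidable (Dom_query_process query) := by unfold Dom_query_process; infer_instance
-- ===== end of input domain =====

-- B replaces A's split/while-loop/dict-index/join pipeline by a single character scan
-- that renames an operator symbol only when it is a whole space-delimited token (alternative, same cost).


-- ===== PORT A =====
-- the rules dict
def qpRules : PySem.Dict (List Char) (List Char) :=
  ((PySem.Dict.empty.insert "AND".toList "+".toList).insert "OR".toList "|".toList).insert
    "NOT".toList "-".toList

-- the while loop over terms: replace terms[i] when it is one of rules.values()
def qpLoop : List (List Char) → List (List Char)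
  | [] => []
  | t :: rest =>
      (if (qpRules.values).contains t then
        match PySem.List.index? qpRules.values t with
        | some j => (PySem.List.pyGet? qpRules.keys (j : Int)).getD t  -- some: index? succeeded
        | none => t
      else t) :: qpLoop rest

def query_process (query : String) : String :=
  String.ofList (PySem.Chars.join [' '] (qpLoop (PySem.Chars.splitOn query.toList [' '])))

-- ===== PORT B =====
-- names dict as a lookup: c in names / names[c]
def opName? (c : Char) : Option (List Char) :=
  if c = '+' then some ['A','N','D']
  else if c = '|' then some ['O','R']
  else if c = '-' then some ['N','O','T']
  else none

-- the scan loop; the Bool is prev_boundary, the head of the remaining list is query[i+1]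
def bScan : List Char → Bool → List Char
  | [], _ => []
  | c :: rest, prev =>
      (match opName? c with
       | some w => if prev && (rest.isEmpty || rest.head? == some ' ') then w else [c]
       | none => [c]) ++ bScan rest (c == ' ')

def query_process_alt (query : String) : String := String.ofList (bScan query.toList true)

-- ===== PRECONDITION & SPEC =====
def Spec_query_process (query : String) (out : String) : Prop := out = query_process_alt query
instance (query : String) (out : String) : Decidable (Spec_query_process query out) := by unfold Spec_query_process; infer_instance

-- ===== CLAIM (what is proved, stated in full; the proofs are below) =====
def Claim_equal_query_process : Prop := ∀ (query : String), Dom_query_process query → Spec_query_process query (query_process query)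

-- ===== LEMMAS AND PROOFS =====

-- the per-term replacement A performs, written directly
def qpF (t : List Char) : List Char :=
  if t = ['+'] then ['A','N','D']
  else if t = ['|'] then ['O','R']
  else if t = ['-'] then ['N','O','T']
  else t

theorem qpLoop_head (t : List Char) :
    (if (qpRules.values).contains t then
      match PySem.List.index? qpRules.values t with
      | some j => (PySem.List.pyGet? qpRules.keys (j : Int)).getD t
      | none => t
    else t) = qpF t := by
  by_cases h1 : t = ['+']
  · subst h1; decide
  · by_cases h2 : t = ['|']
    · subst h2; decide
    · by_cases h3 : t = ['-']
      · subst h3; decide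
      · have hv : qpRules.values = [['+'], ['|'], ['-']] := by decide
        have hm : t ∉ qpRules.values := by simp [hv, h1, h2, h3]
        simp [hm, qpF, h1, h2, h3]

theorem qpLoop_eq_map (ts : List (List Char)) : qpLoop ts = ts.map qpF := by
  induction ts with
  | nil => rfl
  | cons t rest ih => simp only [qpLoop, List.map, ih, qpLoop_head]

-- structural characterisation of split on a single space
def splitSp : List Char → List (List Char)
  | [] => [[]]
  | c :: rest =>
      if c = ' ' then [] :: splitSp rest
      else
        match splitSp rest with
        | t :: ts => (c :: t) :: ts
        | [] => [[c]]

theorem splitSp_ne_nil (cs : List Char) : splitSp cs ≠ [] := by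
  cases cs with
  | nil => simp [splitSp]
  | cons c rest =>
      simp only [splitSp]
      split
      · simp
      · split <;> simp

theorem go_eq (fuel : Nat) : ∀ (l cur : List Char) (acc : List (List Char)),
    l.length < fuel →
    PySem.Chars.splitOn.go [' '] fuel l cur acc =
      acc.reverse ++ (match splitSp l with
        | t :: ts => (cur.reverse ++ t) :: ts
        | [] => [cur.reverse]) := by
  induction fuel with
  | zero => intro l cur acc h; omega
  | succ fuel ih =>
      intro l cur acc h
      cases l with
      | nil => simp [PySem.Chars.splitOn.go, splitSp]
      | cons c rest =>
          by_cases hc : c = ' '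
          · have hpre : List.isPrefixOf [' '] (c :: rest) = true := by
              simp [List.isPrefixOf, hc]
            simp only [PySem.Chars.splitOn.go, hpre, if_true]
            rw [show List.drop [' '].length (c :: rest) = rest by simp]
            rw [ih rest [] (cur.reverse :: acc) (by simpa using Nat.lt_of_succ_lt_succ h)]
            rcases hsp : splitSp rest with _ | ⟨t, ts⟩
            · exact absurd hsp (splitSp_ne_nil rest)
            · simp [splitSp, hc, hsp]
          · have hpre : List.isPrefixOf [' '] (c :: rest) = false := by
              simp [List.isPrefixOf]; exact fun hh => absurd hh.symm hc
            simp only [PySem.Chars.splitOn.go, hpre]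
            rw [if_neg (by simp)]
            rw [ih rest (c :: cur) acc (by simpa using Nat.lt_of_succ_lt_succ h)]
            rcases hsp : splitSp rest with _ | ⟨t, ts⟩
            · exact absurd hsp (splitSp_ne_nil rest)
            · simp [splitSp, hc, hsp]

theorem splitOn_eq_splitSp (cs : List Char) :
    PySem.Chars.splitOn cs [' '] = splitSp cs := by
  rw [PySem.Chars.splitOn, go_eq (cs.length + 1) cs [] [] (by omega)]
  rcases hsp : splitSp cs with _ | ⟨t, ts⟩
  · exact absurd hsp (splitSp_ne_nil cs)
  · simp

-- the contribution of the tokens after the first one to the joined result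
def qpJ : List (List Char) → List Char
  | [] => []
  | u :: us => ' ' :: (qpF u ++ qpJ us)

theorem bScan_cons (c : Char) (rest : List Char) (prev : Bool) :
    bScan (c :: rest) prev =
      (match opName? c with
       | some w => if prev && (rest.isEmpty || rest.head? == some ' ') then w else [c]
       | none => [c]) ++ bScan rest (c == ' ') := rfl

theorem join_map_qpF (ts : List (List Char)) : ∀ (t : List Char),
    PySem.Chars.join [' '] (List.map qpF (t :: ts)) = qpF t ++ qpJ ts := by
  induction ts with
  | nil => intro t; simp [PySem.Chars.join_singleton, qpJ]
  | cons u us ih =>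
      intro t
      simp only [List.map]
      rw [PySem.Chars.join_cons_cons]
      have := ih u
      simp only [List.map] at this
      rw [this]
      simp [qpJ]

theorem bScan_eq_tokens : ∀ (cs : List Char) (t : List Char) (ts : List (List Char)),
    splitSp cs = t :: ts →
    bScan cs true = qpF t ++ qpJ ts ∧ bScan cs false = t ++ qpJ ts := by
  intro cs
  induction cs with
  | nil =>
      intro t ts h
      simp only [splitSp] at h
      cases h
      simp [bScan, qpJ, qpF]
  | cons c rest ih =>
      intro t ts h
      rcases hsp : splitSp rest with _ | ⟨t', ts'⟩
      · exact absurd hsp (splitSp_ne_nil rest)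
      by_cases hc : c = ' '
      · -- a space: empty token ends here, boundary resets
        have h' : ([] : List Char) :: t' :: ts' = t :: ts := by
          rw [← h]; simp [splitSp, hc, hsp]
        cases h'
        have hI := (ih t' ts' hsp).1
        constructor <;> simp [bScan, hc, opName?, hI, qpJ, qpF]

      · -- a token character
        have h' : (c :: t') :: ts' = t :: ts := by
          rw [← h]; simp [splitSp, hc, hsp]
        cases h'
        have hF := (ih t' ts hsp).2
        have hcb : (c == ' ') = false := by simpa using hc
        have hfalse : bScan (c :: rest) false = (c :: t') ++ qpJ ts := by
          rcases ho : opName? c with _ | w <;> simp [bScan, hcb, ho, hF]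
        refine ⟨?_, hfalse⟩
        rcases ho : opName? c with _ | w
        · -- not an operator symbol: never replaced
          have hne : c ≠ '+' ∧ c ≠ '|' ∧ c ≠ '-' := by
            simp only [opName?] at ho
            split_ifs at ho; simp_all
          have hid : qpF (c :: t') = c :: t' := by
            simp [qpF, hne.1, hne.2.1, hne.2.2]
          simp [bScan, hcb, ho, hF, hid]
        · by_cases hb : rest = [] ∨ rest.head? = some ' '
          · -- whole-token operator symbol: replaced on both sides
            have ht' : t' = [] := by
              rcases hb with rfl | hb
              · simp only [splitSp] at hsp
                injection hsp with h1 h2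
                exact h1.symm
              · rcases rest with _ | ⟨d, r2⟩
                · simp at hb
                · have hd : d = ' ' := by simpa using hb
                  subst hd
                  simp [splitSp] at hsp
                  exact hsp.1
            subst ht'
            have hw : qpF [c] = w := by
              simp only [opName?] at ho
              split_ifs at ho with h1 h2 h3 <;> simp_all [qpF]
            have hbb : (rest.isEmpty || rest.head? == some ' ') = true := by
              rcases hb with rfl | hb2
              · simp
              · simp [hb2]
            simp [bScan, hcb, ho, hbb, hF, hw]
          · -- operator symbol glued into a longer token: kept as is
            have hb1 : rest ≠ [] := fun hh => hb (Or.inl hh)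
            have hb2 : rest.head? ≠ some ' ' := fun hh => hb (Or.inr hh)
            rcases rest with _ | ⟨d, r2⟩
            · exact absurd rfl hb1
            have hd : d ≠ ' ' := by
              intro hd; exact hb2 (by simp [hd])
            have ht' : t' ≠ [] := by
              rcases h2 : splitSp r2 with _ | ⟨u, us⟩
              · exact absurd h2 (splitSp_ne_nil r2)
              · rw [show splitSp (d :: r2) = (d :: u) :: us by simp [splitSp, hd, h2]] at hsp
                injection hsp with h1 _
                rw [← h1]
                simp
            have hid : qpF (c :: t') = c :: t' := by
              rcases t' with _ | ⟨e, t2⟩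
              · exact absurd rfl ht'
              · simp [qpF]
            have hbb : ((d :: r2).isEmpty || (d :: r2).head? == some ' ') = false := by
              simp [hd]
            rw [bScan_cons, ho, hcb, hF]
            simp [hd, hid]

theorem query_process_spec : Claim_equal_query_process := by
  intro query _
  unfold Spec_query_process query_process query_process_alt
  rw [splitOn_eq_splitSp, qpLoop_eq_map]
  rcases hsp : splitSp query.toList with _ | ⟨t, ts⟩
  · exact absurd hsp (splitSp_ne_nil query.toList)
  · rw [join_map_qpF, (bScan_eq_tokens query.toList t ts hsp).1]
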